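-- pv_equiv track=rewrite | github.com/upskillize-ui/AI_Profile_Maker_agent | app/agents/summary_agent.py | _derive_domain
-- ===== SOURCE A (Python) =====
-- def _derive_domain(course_names: list, education=None, work_experience=None, personal=None) -> str:
--     if education is None: education = []
--     if work_experience is None: work_experience = []
--     if personal is None: personal = {}
--
--     all_text_parts = list(course_names)
--     for edu in education:
--         all_text_parts.append(edu.get("degree", ""))
--         all_text_parts.append(edu.get("field_of_study", ""))
--         all_text_parts.append(edu.get("institution", ""))
--     for work in work_experience:
--         all_text_parts.append(work.get("title", ""))
--         all_text_parts.append(work.get("company", ""))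
--         all_text_parts.append(work.get("description", ""))
--     all_text_parts.append(personal.get("career_goals", "") or "")
--     all_text_parts.append(personal.get("preferred_role", "") or "")
--     all_text_parts.append(personal.get("current_designation", "") or "")
--     all_text_parts.append(personal.get("linkedin_headline", "") or "")
--     all_text_parts.append(personal.get("key_skills", "") or "")
--
--     text = " ".join(all_text_parts).lower()
--     if not text.strip():
--         return "Financial Services"
--
--     if "business analy" in text or "business intelligence" in text:
--         return "Business Analysis & Analytics"
--     elif "ux" in text or "user experience" in text or "user interface" in text or "ui design" in text:
--         return "UX/UI Design & Digital Product"
--     elif "data analy" in text or "data scien" in text or "power bi" in text or "tableau" in text: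
--         return "Data Analytics & Business Intelligence"
--     elif "web develop" in text or "full stack" in text or "frontend" in text or "backend" in text:
--         return "Software Development & Engineering"
--     elif "digital market" in text or "marketing" in text or "seo" in text:
--         return "Digital Marketing & Strategy"
--     elif "fintech" in text or "digital bank" in text:
--         return "FinTech & Digital Banking"
--     elif "operations executive" in text or "branch operations" in text or "core banking" in text:
--         return "Banking Operations & Financial Services"
--     elif "e-commerce" in text or "ecommerce" in text:
--         return "E-Commerce & Digital Business"
--     elif "payment" in text or "card" in text or "upi" in text:
--         return "Payment Systems & Digital Transactions"
--     elif "banking" in text or "b.com" in text or "bcom" in text or "commerce" in text: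
--         return "Banking & Financial Services"
--     elif "insurance" in text:
--         return "Insurance & Risk"
--     elif "risk" in text or "compliance" in text:
--         return "Risk & Compliance"
--     elif "finance" in text:
--         return "Finance & Financial Services"
--     elif "python" in text or "java" in text or "programming" in text:
--         return "Software Development"
--     elif "design" in text:
--         return "Design & Creative Technology"
--     return "Financial Services"
-- ===== SOURCE B (Python) =====
-- # B: instead of checking rule groups sequentially, map every keyword to the
-- # priority of its rule (flat alphabetical keyword->priority table), collect the
-- # priorities of all keywords present in the text, and return the label of the
-- # minimum priority (default if none matched).
--
-- _LABELS = [
--     "Business Analysis & Analytics",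
--     "UX/UI Design & Digital Product",
--     "Data Analytics & Business Intelligence",
--     "Software Development & Engineering",
--     "Digital Marketing & Strategy",
--     "FinTech & Digital Banking",
--     "Banking Operations & Financial Services",
--     "E-Commerce & Digital Business",
--     "Payment Systems & Digital Transactions",
--     "Banking & Financial Services",
--     "Insurance & Risk",
--     "Risk & Compliance",
--     "Finance & Financial Services",
--     "Software Development",
--     "Design & Creative Technology",
-- ]
--
-- _KEYWORD_PRIORITY = {
--     "b.com": 9, "backend": 3, "banking": 9, "bcom": 9, "branch operations": 6,
--     "business analy": 0, "business intelligence": 0, "card": 8, "commerce": 9,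
--     "compliance": 11, "core banking": 6, "data analy": 2, "data scien": 2,
--     "design": 14, "digital bank": 5, "digital market": 4, "e-commerce": 7,
--     "ecommerce": 7, "finance": 12, "fintech": 5, "frontend": 3, "full stack": 3,
--     "insurance": 10, "java": 13, "marketing": 4, "operations executive": 6,
--     "payment": 8, "power bi": 2, "programming": 13, "python": 13, "risk": 11,
--     "seo": 4, "tableau": 2, "ui design": 1, "upi": 8, "user experience": 1,
--     "user interface": 1, "ux": 1, "web develop": 3,
-- }
--
-- _DEFAULT = "Financial Services"
--
--
-- def _label_of(best):
--     return _LABELS[best] if best is not None else _DEFAULT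
--
--
-- def _derive_domain(course_names: list, education=None, work_experience=None, personal=None) -> str:
--     if education is None: education = []
--     if work_experience is None: work_experience = []
--     if personal is None: personal = {}
--
--     parts = (list(course_names)
--              + [e.get(k, "") for e in education
--                 for k in ("degree", "field_of_study", "institution")]
--              + [w.get(k, "") for w in work_experience
--                 for k in ("title", "company", "description")]
--              + [(personal.get(k) or "") for k in
--                 ("career_goals", "preferred_role", "current_designation",
--                  "linkedin_headline", "key_skills")])
--
--     text = " ".join(parts).lower()
--     if not text.strip():
--         return _DEFAULT
--
--     best = min((prio for kw, prio in _KEYWORD_PRIORITY.items() if kw in text),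
--                default=None)
--     return _label_of(best)
-- ===== Notes on version B (the rewrite author's own statement) =====
-- stated objective: alternative
-- what changed: A's 15-branch if/elif cascade is replaced by a flat alphabetical keyword->priority map: B collects the priorities of all keywords occurring in the text and returns the label of the minimum priority, instead of probing rule groups sequentially with early exit.
import Mathlib
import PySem

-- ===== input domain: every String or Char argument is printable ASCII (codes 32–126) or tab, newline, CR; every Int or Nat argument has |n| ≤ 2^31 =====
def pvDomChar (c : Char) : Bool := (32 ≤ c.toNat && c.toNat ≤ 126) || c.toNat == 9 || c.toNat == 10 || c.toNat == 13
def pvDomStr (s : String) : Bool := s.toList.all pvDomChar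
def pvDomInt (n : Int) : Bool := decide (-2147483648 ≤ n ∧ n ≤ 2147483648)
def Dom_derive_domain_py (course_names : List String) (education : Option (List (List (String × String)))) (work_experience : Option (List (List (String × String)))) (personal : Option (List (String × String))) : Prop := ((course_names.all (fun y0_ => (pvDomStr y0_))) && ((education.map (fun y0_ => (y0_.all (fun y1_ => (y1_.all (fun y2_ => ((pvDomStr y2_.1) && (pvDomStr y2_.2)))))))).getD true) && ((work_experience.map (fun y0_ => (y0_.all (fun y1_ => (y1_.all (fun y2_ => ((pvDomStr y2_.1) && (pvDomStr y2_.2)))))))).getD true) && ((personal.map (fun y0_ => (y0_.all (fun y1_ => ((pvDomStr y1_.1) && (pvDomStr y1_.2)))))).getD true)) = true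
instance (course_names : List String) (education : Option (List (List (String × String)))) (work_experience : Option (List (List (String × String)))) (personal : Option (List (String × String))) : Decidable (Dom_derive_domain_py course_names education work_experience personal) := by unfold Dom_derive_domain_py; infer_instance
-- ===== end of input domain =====

-- B replaces A's 15-branch if/elif cascade by a flat alphabetical keyword->priority
-- table: it collects the priorities of ALL keywords occurring in the text and returns
-- the label of the minimum priority (idiomatic, order-independent aggregation).

-- ===== PORT A =====

-- dict.get(k, "") on an association-list dict (both ports use Python's dict.get)
def pvGet (d : List (String × String)) (k : String) : String :=
  PySem.Dict.getD (PySem.Dict.ofList d) k ""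

-- the concatenated lowercased profile text, exactly as A builds it
-- (Python's `x or ""` on dict string values is the identity, so `.get(k, "") or ""` = `.get(k, "")`)
def pvTextA (course_names : List String) (education : List (List (String × String)))
    (work_experience : List (List (String × String))) (personal : List (String × String)) : String :=
  let parts1 := education.foldl (fun acc edu =>
    acc ++ [pvGet edu "degree", pvGet edu "field_of_study", pvGet edu "institution"]) course_names
  let parts2 := work_experience.foldl (fun acc work =>
    acc ++ [pvGet work "title", pvGet work "company", pvGet work "description"]) parts1
  let parts := parts2 ++ [pvGet personal "career_goals",
    pvGet personal "preferred_role", pvGet personal "current_designation",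
    pvGet personal "linkedin_headline", pvGet personal "key_skills"]
  PySem.Str.lower (PySem.Str.join " " parts)

-- A's if/elif cascade on the text
def pvClassifyA (text : String) : String :=
  if PySem.Str.isIn "business analy" text || PySem.Str.isIn "business intelligence" text then
    "Business Analysis & Analytics"
  else if PySem.Str.isIn "ux" text || PySem.Str.isIn "user experience" text || PySem.Str.isIn "user interface" text || PySem.Str.isIn "ui design" text then
    "UX/UI Design & Digital Product"
  else if PySem.Str.isIn "data analy" text || PySem.Str.isIn "data scien" text || PySem.Str.isIn "power bi" text || PySem.Str.isIn "tableau" text then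
    "Data Analytics & Business Intelligence"
  else if PySem.Str.isIn "web develop" text || PySem.Str.isIn "full stack" text || PySem.Str.isIn "frontend" text || PySem.Str.isIn "backend" text then
    "Software Development & Engineering"
  else if PySem.Str.isIn "digital market" text || PySem.Str.isIn "marketing" text || PySem.Str.isIn "seo" text then
    "Digital Marketing & Strategy"
  else if PySem.Str.isIn "fintech" text || PySem.Str.isIn "digital bank" text then
    "FinTech & Digital Banking"
  else if PySem.Str.isIn "operations executive" text || PySem.Str.isIn "branch operations" text || PySem.Str.isIn "core banking" text then
    "Banking Operations & Financial Services"
  else if PySem.Str.isIn "e-commerce" text || PySem.Str.isIn "ecommerce" text then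
    "E-Commerce & Digital Business"
  else if PySem.Str.isIn "payment" text || PySem.Str.isIn "card" text || PySem.Str.isIn "upi" text then
    "Payment Systems & Digital Transactions"
  else if PySem.Str.isIn "banking" text || PySem.Str.isIn "b.com" text || PySem.Str.isIn "bcom" text || PySem.Str.isIn "commerce" text then
    "Banking & Financial Services"
  else if PySem.Str.isIn "insurance" text then
    "Insurance & Risk"
  else if PySem.Str.isIn "risk" text || PySem.Str.isIn "compliance" text then
    "Risk & Compliance"
  else if PySem.Str.isIn "finance" text then
    "Finance & Financial Services"
  else if PySem.Str.isIn "python" text || PySem.Str.isIn "java" text || PySem.Str.isIn "programming" text then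
    "Software Development"
  else if PySem.Str.isIn "design" text then
    "Design & Creative Technology"
  else "Financial Services"

def derive_domain_py (course_names : List String) (education : Option (List (List (String × String)))) (work_experience : Option (List (List (String × String)))) (personal : Option (List (String × String))) : String :=
  let text := pvTextA course_names (education.getD []) (work_experience.getD []) (personal.getD [])
  if PySem.Str.strip text = "" then "Financial Services" else pvClassifyA text

-- ===== PORT B =====

def pvLabels : List String :=
  [ "Business Analysis & Analytics",
    "UX/UI Design & Digital Product",
    "Data Analytics & Business Intelligence",
    "Software Development & Engineering",
    "Digital Marketing & Strategy",
    "FinTech & Digital Banking",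
    "Banking Operations & Financial Services",
    "E-Commerce & Digital Business",
    "Payment Systems & Digital Transactions",
    "Banking & Financial Services",
    "Insurance & Risk",
    "Risk & Compliance",
    "Finance & Financial Services",
    "Software Development",
    "Design & Creative Technology" ]

def pvDefault : String := "Financial Services"

-- the flat keyword -> rule-priority table, in Source B's (alphabetical) dict order
def pvCatalog : List (String × Nat) :=
  [ ("b.com", 9),
    ("backend", 3),
    ("banking", 9),
    ("bcom", 9),
    ("branch operations", 6),
    ("business analy", 0),
    ("business intelligence", 0),
    ("card", 8),
    ("commerce", 9),
    ("compliance", 11),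
    ("core banking", 6),
    ("data analy", 2),
    ("data scien", 2),
    ("design", 14),
    ("digital bank", 5),
    ("digital market", 4),
    ("e-commerce", 7),
    ("ecommerce", 7),
    ("finance", 12),
    ("fintech", 5),
    ("frontend", 3),
    ("full stack", 3),
    ("insurance", 10),
    ("java", 13),
    ("marketing", 4),
    ("operations executive", 6),
    ("payment", 8),
    ("power bi", 2),
    ("programming", 13),
    ("python", 13),
    ("risk", 11),
    ("seo", 4),
    ("tableau", 2),
    ("ui design", 1),
    ("upi", 8),
    ("user experience", 1),
    ("user interface", 1),
    ("ux", 1),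
    ("web develop", 3) ]

-- B builds the same parts list by list concatenation of comprehensions
def pvTextB (course_names : List String) (education : List (List (String × String)))
    (work_experience : List (List (String × String))) (personal : List (String × String)) : String :=
  let parts := course_names
    ++ education.flatMap (fun e => [pvGet e "degree", pvGet e "field_of_study", pvGet e "institution"])
    ++ work_experience.flatMap (fun w => [pvGet w "title", pvGet w "company", pvGet w "description"])
    ++ (["career_goals", "preferred_role", "current_designation",
         "linkedin_headline", "key_skills"].map (fun k => pvGet personal k))
  PySem.Str.lower (PySem.Str.join " " parts)

-- min((prio for kw, prio in table if kw in text), default=None)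
def pvMinHit (text : String) : Option Nat :=
  pvCatalog.foldl (fun best p =>
    if PySem.Str.isIn p.1 text then
      some (match best with | none => p.2 | some m => min m p.2)
    else best) none

-- `_LABELS[best] if best is not None else _DEFAULT`
def pvLabelOf (best : Option Nat) : String :=
  match best with
  | none => pvDefault
  | some g => pvLabels.getD g pvDefault

def derive_domain_py_alt (course_names : List String) (education : Option (List (List (String × String)))) (work_experience : Option (List (List (String × String)))) (personal : Option (List (String × String))) : String :=
  let text := pvTextB course_names (education.getD []) (work_experience.getD []) (personal.getD [])
  if PySem.Str.strip text = "" then pvDefault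
  else pvLabelOf (pvMinHit text)

-- ===== PRECONDITION & SPEC =====
def Spec_derive_domain_py (course_names : List String) (education : Option (List (List (String × String)))) (work_experience : Option (List (List (String × String)))) (personal : Option (List (String × String))) (out : String) : Prop := out = derive_domain_py_alt course_names education work_experience personal
instance (course_names : List String) (education : Option (List (List (String × String)))) (work_experience : Option (List (List (String × String)))) (personal : Option (List (String × String))) (out : String) : Decidable (Spec_derive_domain_py course_names education work_experience personal out) := by unfold Spec_derive_domain_py; infer_instance

-- ===== CLAIM (what is proved, stated in full; the proofs are below) =====
def Claim_equal_derive_domain_py : Prop := ∀ (course_names : List String) (education : Option (List (List (String × String)))) (work_experience : Option (List (List (String × String)))) (personal : Option (List (String × String))), Dom_derive_domain_py course_names education work_experience personal → Spec_derive_domain_py course_names education work_experience personal (derive_domain_py course_names education work_experience personal)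

-- ===== LEMMAS AND PROOFS =====

theorem pvText_eq (cn : List String) (e w : List (List (String × String)))
    (p : List (String × String)) : pvTextA cn e w p = pvTextB cn e w p := by
  simp [pvTextA, pvTextB, PySem.List.foldl_append_eq_flatMap, List.flatMap_def, List.append_assoc]

-- the priorities of all keywords present in the text
def pvM (text : String) : List Nat :=
  pvCatalog.filterMap (fun p => if PySem.Str.isIn p.1 text then some p.2 else none)

-- A's condition for rule g, as a function of g (proof-side only)
def pvCond (g : Nat) (text : String) : Bool :=
  match g with
  | 0 => PySem.Str.isIn "business analy" text || PySem.Str.isIn "business intelligence" text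
  | 1 => PySem.Str.isIn "ux" text || PySem.Str.isIn "user experience" text || PySem.Str.isIn "user interface" text || PySem.Str.isIn "ui design" text
  | 2 => PySem.Str.isIn "data analy" text || PySem.Str.isIn "data scien" text || PySem.Str.isIn "power bi" text || PySem.Str.isIn "tableau" text
  | 3 => PySem.Str.isIn "web develop" text || PySem.Str.isIn "full stack" text || PySem.Str.isIn "frontend" text || PySem.Str.isIn "backend" text
  | 4 => PySem.Str.isIn "digital market" text || PySem.Str.isIn "marketing" text || PySem.Str.isIn "seo" text
  | 5 => PySem.Str.isIn "fintech" text || PySem.Str.isIn "digital bank" text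
  | 6 => PySem.Str.isIn "operations executive" text || PySem.Str.isIn "branch operations" text || PySem.Str.isIn "core banking" text
  | 7 => PySem.Str.isIn "e-commerce" text || PySem.Str.isIn "ecommerce" text
  | 8 => PySem.Str.isIn "payment" text || PySem.Str.isIn "card" text || PySem.Str.isIn "upi" text
  | 9 => PySem.Str.isIn "banking" text || PySem.Str.isIn "b.com" text || PySem.Str.isIn "bcom" text || PySem.Str.isIn "commerce" text
  | 10 => PySem.Str.isIn "insurance" text
  | 11 => PySem.Str.isIn "risk" text || PySem.Str.isIn "compliance" text
  | 12 => PySem.Str.isIn "finance" text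
  | 13 => PySem.Str.isIn "python" text || PySem.Str.isIn "java" text || PySem.Str.isIn "programming" text
  | 14 => PySem.Str.isIn "design" text
  | _ => false

theorem pvFoldl_some_min (l : List Nat) (a : Nat) :
    l.foldl (fun best g => some (match best with | none => g | some m => min m g)) (some a)
      = some (l.foldl min a) := by
  induction l generalizing a with
  | nil => rfl
  | cons b l ih => simp [List.foldl_cons, ih]

theorem pvFold_filter (t : String) : ∀ (l : List (String × Nat)) (acc : Option Nat),
    l.foldl (fun best p =>
        if PySem.Str.isIn p.1 t then
          some (match best with | none => p.2 | some m => min m p.2)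
        else best) acc
      = (l.filterMap (fun p => if PySem.Str.isIn p.1 t then some p.2 else none)).foldl
          (fun best g => some (match best with | none => g | some m => min m g)) acc
  | [], _ => rfl
  | p :: l, acc => by
    simp only [List.foldl_cons, List.filterMap_cons]
    by_cases h : PySem.Str.isIn p.1 t = true
    · rw [if_pos h, if_pos h]
      exact pvFold_filter t l _
    · rw [if_neg h, if_neg h]
      exact pvFold_filter t l acc

theorem pvMinHit_eq_min? (t : String) : pvMinHit t = (pvM t).min? := by
  rw [pvMinHit, pvFold_filter t pvCatalog none, ← pvM]
  cases hM : pvM t with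
  | nil => rfl
  | cons a l =>
    rw [List.min?_cons']
    simp only [List.foldl_cons]
    exact pvFoldl_some_min l a

set_option maxHeartbeats 2000000 in
theorem pvMem_M_iff (t : String) (x : Nat) : x ∈ pvM t ↔ x < 15 ∧ pvCond x t = true := by
  constructor
  · intro h
    simp only [pvM, pvCatalog, List.mem_filterMap, List.mem_cons, List.not_mem_nil, or_false] at h
    obtain ⟨p, hp, hpx⟩ := h
    rcases hp with (rfl|rfl|rfl|rfl|rfl|rfl|rfl|rfl|rfl|rfl|rfl|rfl|rfl|rfl|rfl|rfl|rfl|rfl|rfl|rfl|rfl|rfl|rfl|rfl|rfl|rfl|rfl|rfl|rfl|rfl|rfl|rfl|rfl|rfl|rfl|rfl|rfl|rfl|rfl)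
      <;> simp only [Option.ite_none_right_eq_some, Option.some.injEq] at hpx
      <;> obtain ⟨hin, rfl⟩ := hpx
      <;> refine ⟨by omega, ?_⟩
      <;> simp only [pvCond, Bool.or_eq_true]
      <;> tauto
  · rintro ⟨hlt, hc⟩
    interval_cases x
    · simp only [pvCond, Bool.or_eq_true] at hc
      rcases hc with (hc|hc)
      · exact List.mem_filterMap.2 ⟨("business analy", 0), by decide, by rw [if_pos hc]⟩
      · exact List.mem_filterMap.2 ⟨("business intelligence", 0), by decide, by rw [if_pos hc]⟩
    · simp only [pvCond, Bool.or_eq_true] at hc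
      rcases hc with (((hc|hc)|hc)|hc)
      · exact List.mem_filterMap.2 ⟨("ux", 1), by decide, by rw [if_pos hc]⟩
      · exact List.mem_filterMap.2 ⟨("user experience", 1), by decide, by rw [if_pos hc]⟩
      · exact List.mem_filterMap.2 ⟨("user interface", 1), by decide, by rw [if_pos hc]⟩
      · exact List.mem_filterMap.2 ⟨("ui design", 1), by decide, by rw [if_pos hc]⟩
    · simp only [pvCond, Bool.or_eq_true] at hc
      rcases hc with (((hc|hc)|hc)|hc)
      · exact List.mem_filterMap.2 ⟨("data analy", 2), by decide, by rw [if_pos hc]⟩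
      · exact List.mem_filterMap.2 ⟨("data scien", 2), by decide, by rw [if_pos hc]⟩
      · exact List.mem_filterMap.2 ⟨("power bi", 2), by decide, by rw [if_pos hc]⟩
      · exact List.mem_filterMap.2 ⟨("tableau", 2), by decide, by rw [if_pos hc]⟩
    · simp only [pvCond, Bool.or_eq_true] at hc
      rcases hc with (((hc|hc)|hc)|hc)
      · exact List.mem_filterMap.2 ⟨("web develop", 3), by decide, by rw [if_pos hc]⟩
      · exact List.mem_filterMap.2 ⟨("full stack", 3), by decide, by rw [if_pos hc]⟩
      · exact List.mem_filterMap.2 ⟨("frontend", 3), by decide, by rw [if_pos hc]⟩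
      · exact List.mem_filterMap.2 ⟨("backend", 3), by decide, by rw [if_pos hc]⟩
    · simp only [pvCond, Bool.or_eq_true] at hc
      rcases hc with ((hc|hc)|hc)
      · exact List.mem_filterMap.2 ⟨("digital market", 4), by decide, by rw [if_pos hc]⟩
      · exact List.mem_filterMap.2 ⟨("marketing", 4), by decide, by rw [if_pos hc]⟩
      · exact List.mem_filterMap.2 ⟨("seo", 4), by decide, by rw [if_pos hc]⟩
    · simp only [pvCond, Bool.or_eq_true] at hc
      rcases hc with (hc|hc)
      · exact List.mem_filterMap.2 ⟨("fintech", 5), by decide, by rw [if_pos hc]⟩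
      · exact List.mem_filterMap.2 ⟨("digital bank", 5), by decide, by rw [if_pos hc]⟩
    · simp only [pvCond, Bool.or_eq_true] at hc
      rcases hc with ((hc|hc)|hc)
      · exact List.mem_filterMap.2 ⟨("operations executive", 6), by decide, by rw [if_pos hc]⟩
      · exact List.mem_filterMap.2 ⟨("branch operations", 6), by decide, by rw [if_pos hc]⟩
      · exact List.mem_filterMap.2 ⟨("core banking", 6), by decide, by rw [if_pos hc]⟩
    · simp only [pvCond, Bool.or_eq_true] at hc
      rcases hc with (hc|hc)
      · exact List.mem_filterMap.2 ⟨("e-commerce", 7), by decide, by rw [if_pos hc]⟩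
      · exact List.mem_filterMap.2 ⟨("ecommerce", 7), by decide, by rw [if_pos hc]⟩
    · simp only [pvCond, Bool.or_eq_true] at hc
      rcases hc with ((hc|hc)|hc)
      · exact List.mem_filterMap.2 ⟨("payment", 8), by decide, by rw [if_pos hc]⟩
      · exact List.mem_filterMap.2 ⟨("card", 8), by decide, by rw [if_pos hc]⟩
      · exact List.mem_filterMap.2 ⟨("upi", 8), by decide, by rw [if_pos hc]⟩
    · simp only [pvCond, Bool.or_eq_true] at hc
      rcases hc with (((hc|hc)|hc)|hc)
      · exact List.mem_filterMap.2 ⟨("banking", 9), by decide, by rw [if_pos hc]⟩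
      · exact List.mem_filterMap.2 ⟨("b.com", 9), by decide, by rw [if_pos hc]⟩
      · exact List.mem_filterMap.2 ⟨("bcom", 9), by decide, by rw [if_pos hc]⟩
      · exact List.mem_filterMap.2 ⟨("commerce", 9), by decide, by rw [if_pos hc]⟩
    · simp only [pvCond, Bool.or_eq_true] at hc
      exact List.mem_filterMap.2 ⟨("insurance", 10), by decide, by rw [if_pos hc]⟩
    · simp only [pvCond, Bool.or_eq_true] at hc
      rcases hc with (hc|hc)
      · exact List.mem_filterMap.2 ⟨("risk", 11), by decide, by rw [if_pos hc]⟩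
      · exact List.mem_filterMap.2 ⟨("compliance", 11), by decide, by rw [if_pos hc]⟩
    · simp only [pvCond, Bool.or_eq_true] at hc
      exact List.mem_filterMap.2 ⟨("finance", 12), by decide, by rw [if_pos hc]⟩
    · simp only [pvCond, Bool.or_eq_true] at hc
      rcases hc with ((hc|hc)|hc)
      · exact List.mem_filterMap.2 ⟨("python", 13), by decide, by rw [if_pos hc]⟩
      · exact List.mem_filterMap.2 ⟨("java", 13), by decide, by rw [if_pos hc]⟩
      · exact List.mem_filterMap.2 ⟨("programming", 13), by decide, by rw [if_pos hc]⟩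
    · simp only [pvCond, Bool.or_eq_true] at hc
      exact List.mem_filterMap.2 ⟨("design", 14), by decide, by rw [if_pos hc]⟩

theorem pvMinM_eq_some (t : String) (k : Nat) (hk : k < 15) (hc : pvCond k t = true)
    (hmin : ∀ j, j < k → pvCond j t = false) : (pvM t).min? = some k := by
  have hkM : k ∈ pvM t := (pvMem_M_iff t k).2 ⟨hk, hc⟩
  have hle : ∀ b ∈ pvM t, k ≤ b := by
    intro b hb
    obtain ⟨hb15, hbc⟩ := (pvMem_M_iff t b).1 hb
    by_contra hlt
    have : pvCond b t = false := hmin b (by omega)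
    simp [this] at hbc
  rw [List.min?_eq_some_iff']
  exact ⟨hkM, hle⟩

theorem pvMinM_eq_none (t : String) (h : ∀ j, j < 15 → pvCond j t = false) :
    (pvM t).min? = none := by
  rw [List.min?_eq_none_iff]
  rw [List.eq_nil_iff_forall_not_mem]
  intro x hx
  obtain ⟨hx15, hxc⟩ := (pvMem_M_iff t x).1 hx
  simp [h x hx15] at hxc

theorem pvClassify_eq (t : String) :
    pvClassifyA t = pvLabelOf (pvMinHit t) := by
  rw [pvMinHit_eq_min?]
  by_cases h0 : pvCond 0 t = true
  · have hm : (pvM t).min? = some 0 := by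
      apply pvMinM_eq_some t 0 (by omega) h0
      intro j hj
      exact absurd hj (Nat.not_lt_zero j)
    simp only [pvCond, Bool.or_eq_true] at h0
    rw [hm]
    rcases h0 with (hx|hx) <;>
      simp only [pvClassifyA, hx] <;>
      simp [pvLabelOf, pvLabels, pvDefault]
  by_cases h1 : pvCond 1 t = true
  · have hm : (pvM t).min? = some 1 := by
      apply pvMinM_eq_some t 1 (by omega) h1
      intro j hj
      interval_cases j
      · revert h0; simp [pvCond]
    simp only [pvCond, Bool.or_eq_true, not_or, Bool.not_eq_true] at h0
    simp only [pvCond, Bool.or_eq_true] at h1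
    rw [hm]
    rcases h1 with (((hx|hx)|hx)|hx) <;>
      simp only [pvClassifyA, h0, hx] <;>
      simp [pvLabelOf, pvLabels, pvDefault]
  by_cases h2 : pvCond 2 t = true
  · have hm : (pvM t).min? = some 2 := by
      apply pvMinM_eq_some t 2 (by omega) h2
      intro j hj
      interval_cases j
      · revert h0; simp [pvCond]
      · revert h1; simp [pvCond]
    simp only [pvCond, Bool.or_eq_true, not_or, Bool.not_eq_true] at h0
    simp only [pvCond, Bool.or_eq_true, not_or, Bool.not_eq_true] at h1
    simp only [pvCond, Bool.or_eq_true] at h2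
    rw [hm]
    rcases h2 with (((hx|hx)|hx)|hx) <;>
      simp only [pvClassifyA, h0, h1, hx] <;>
      simp [pvLabelOf, pvLabels, pvDefault]
  by_cases h3 : pvCond 3 t = true
  · have hm : (pvM t).min? = some 3 := by
      apply pvMinM_eq_some t 3 (by omega) h3
      intro j hj
      interval_cases j
      · revert h0; simp [pvCond]
      · revert h1; simp [pvCond]
      · revert h2; simp [pvCond]
    simp only [pvCond, Bool.or_eq_true, not_or, Bool.not_eq_true] at h0
    simp only [pvCond, Bool.or_eq_true, not_or, Bool.not_eq_true] at h1
    simp only [pvCond, Bool.or_eq_true, not_or, Bool.not_eq_true] at h2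
    simp only [pvCond, Bool.or_eq_true] at h3
    rw [hm]
    rcases h3 with (((hx|hx)|hx)|hx) <;>
      simp only [pvClassifyA, h0, h1, h2, hx] <;>
      simp [pvLabelOf, pvLabels, pvDefault]
  by_cases h4 : pvCond 4 t = true
  · have hm : (pvM t).min? = some 4 := by
      apply pvMinM_eq_some t 4 (by omega) h4
      intro j hj
      interval_cases j
      · revert h0; simp [pvCond]
      · revert h1; simp [pvCond]
      · revert h2; simp [pvCond]
      · revert h3; simp [pvCond]
    simp only [pvCond, Bool.or_eq_true, not_or, Bool.not_eq_true] at h0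
    simp only [pvCond, Bool.or_eq_true, not_or, Bool.not_eq_true] at h1
    simp only [pvCond, Bool.or_eq_true, not_or, Bool.not_eq_true] at h2
    simp only [pvCond, Bool.or_eq_true, not_or, Bool.not_eq_true] at h3
    simp only [pvCond, Bool.or_eq_true] at h4
    rw [hm]
    rcases h4 with ((hx|hx)|hx) <;>
      simp only [pvClassifyA, h0, h1, h2, h3, hx] <;>
      simp [pvLabelOf, pvLabels, pvDefault]
  by_cases h5 : pvCond 5 t = true
  · have hm : (pvM t).min? = some 5 := by
      apply pvMinM_eq_some t 5 (by omega) h5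
      intro j hj
      interval_cases j
      · revert h0; simp [pvCond]
      · revert h1; simp [pvCond]
      · revert h2; simp [pvCond]
      · revert h3; simp [pvCond]
      · revert h4; simp [pvCond]
    simp only [pvCond, Bool.or_eq_true, not_or, Bool.not_eq_true] at h0
    simp only [pvCond, Bool.or_eq_true, not_or, Bool.not_eq_true] at h1
    simp only [pvCond, Bool.or_eq_true, not_or, Bool.not_eq_true] at h2
    simp only [pvCond, Bool.or_eq_true, not_or, Bool.not_eq_true] at h3
    simp only [pvCond, Bool.or_eq_true, not_or, Bool.not_eq_true] at h4
    simp only [pvCond, Bool.or_eq_true] at h5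
    rw [hm]
    rcases h5 with (hx|hx) <;>
      simp only [pvClassifyA, h0, h1, h2, h3, h4, hx] <;>
      simp [pvLabelOf, pvLabels, pvDefault]
  by_cases h6 : pvCond 6 t = true
  · have hm : (pvM t).min? = some 6 := by
      apply pvMinM_eq_some t 6 (by omega) h6
      intro j hj
      interval_cases j
      · revert h0; simp [pvCond]
      · revert h1; simp [pvCond]
      · revert h2; simp [pvCond]
      · revert h3; simp [pvCond]
      · revert h4; simp [pvCond]
      · revert h5; simp [pvCond]
    simp only [pvCond, Bool.or_eq_true, not_or, Bool.not_eq_true] at h0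
    simp only [pvCond, Bool.or_eq_true, not_or, Bool.not_eq_true] at h1
    simp only [pvCond, Bool.or_eq_true, not_or, Bool.not_eq_true] at h2
    simp only [pvCond, Bool.or_eq_true, not_or, Bool.not_eq_true] at h3
    simp only [pvCond, Bool.or_eq_true, not_or, Bool.not_eq_true] at h4
    simp only [pvCond, Bool.or_eq_true, not_or, Bool.not_eq_true] at h5
    simp only [pvCond, Bool.or_eq_true] at h6
    rw [hm]
    rcases h6 with ((hx|hx)|hx) <;>
      simp only [pvClassifyA, h0, h1, h2, h3, h4, h5, hx] <;>
      simp [pvLabelOf, pvLabels, pvDefault]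
  by_cases h7 : pvCond 7 t = true
  · have hm : (pvM t).min? = some 7 := by
      apply pvMinM_eq_some t 7 (by omega) h7
      intro j hj
      interval_cases j
      · revert h0; simp [pvCond]
      · revert h1; simp [pvCond]
      · revert h2; simp [pvCond]
      · revert h3; simp [pvCond]
      · revert h4; simp [pvCond]
      · revert h5; simp [pvCond]
      · revert h6; simp [pvCond]
    simp only [pvCond, Bool.or_eq_true, not_or, Bool.not_eq_true] at h0
    simp only [pvCond, Bool.or_eq_true, not_or, Bool.not_eq_true] at h1
    simp only [pvCond, Bool.or_eq_true, not_or, Bool.not_eq_true] at h2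
    simp only [pvCond, Bool.or_eq_true, not_or, Bool.not_eq_true] at h3
    simp only [pvCond, Bool.or_eq_true, not_or, Bool.not_eq_true] at h4
    simp only [pvCond, Bool.or_eq_true, not_or, Bool.not_eq_true] at h5
    simp only [pvCond, Bool.or_eq_true, not_or, Bool.not_eq_true] at h6
    simp only [pvCond, Bool.or_eq_true] at h7
    rw [hm]
    rcases h7 with (hx|hx) <;>
      simp only [pvClassifyA, h0, h1, h2, h3, h4, h5, h6, hx] <;>
      simp [pvLabelOf, pvLabels, pvDefault]
  by_cases h8 : pvCond 8 t = true
  · have hm : (pvM t).min? = some 8 := by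
      apply pvMinM_eq_some t 8 (by omega) h8
      intro j hj
      interval_cases j
      · revert h0; simp [pvCond]
      · revert h1; simp [pvCond]
      · revert h2; simp [pvCond]
      · revert h3; simp [pvCond]
      · revert h4; simp [pvCond]
      · revert h5; simp [pvCond]
      · revert h6; simp [pvCond]
      · revert h7; simp [pvCond]
    simp only [pvCond, Bool.or_eq_true, not_or, Bool.not_eq_true] at h0
    simp only [pvCond, Bool.or_eq_true, not_or, Bool.not_eq_true] at h1
    simp only [pvCond, Bool.or_eq_true, not_or, Bool.not_eq_true] at h2
    simp only [pvCond, Bool.or_eq_true, not_or, Bool.not_eq_true] at h3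
    simp only [pvCond, Bool.or_eq_true, not_or, Bool.not_eq_true] at h4
    simp only [pvCond, Bool.or_eq_true, not_or, Bool.not_eq_true] at h5
    simp only [pvCond, Bool.or_eq_true, not_or, Bool.not_eq_true] at h6
    simp only [pvCond, Bool.or_eq_true, not_or, Bool.not_eq_true] at h7
    simp only [pvCond, Bool.or_eq_true] at h8
    rw [hm]
    rcases h8 with ((hx|hx)|hx) <;>
      simp only [pvClassifyA, h0, h1, h2, h3, h4, h5, h6, h7, hx] <;>
      simp [pvLabelOf, pvLabels, pvDefault]
  by_cases h9 : pvCond 9 t = true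
  · have hm : (pvM t).min? = some 9 := by
      apply pvMinM_eq_some t 9 (by omega) h9
      intro j hj
      interval_cases j
      · revert h0; simp [pvCond]
      · revert h1; simp [pvCond]
      · revert h2; simp [pvCond]
      · revert h3; simp [pvCond]
      · revert h4; simp [pvCond]
      · revert h5; simp [pvCond]
      · revert h6; simp [pvCond]
      · revert h7; simp [pvCond]
      · revert h8; simp [pvCond]
    simp only [pvCond, Bool.or_eq_true, not_or, Bool.not_eq_true] at h0
    simp only [pvCond, Bool.or_eq_true, not_or, Bool.not_eq_true] at h1
    simp only [pvCond, Bool.or_eq_true, not_or, Bool.not_eq_true] at h2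
    simp only [pvCond, Bool.or_eq_true, not_or, Bool.not_eq_true] at h3
    simp only [pvCond, Bool.or_eq_true, not_or, Bool.not_eq_true] at h4
    simp only [pvCond, Bool.or_eq_true, not_or, Bool.not_eq_true] at h5
    simp only [pvCond, Bool.or_eq_true, not_or, Bool.not_eq_true] at h6
    simp only [pvCond, Bool.or_eq_true, not_or, Bool.not_eq_true] at h7
    simp only [pvCond, Bool.or_eq_true, not_or, Bool.not_eq_true] at h8
    simp only [pvCond, Bool.or_eq_true] at h9
    rw [hm]
    rcases h9 with (((hx|hx)|hx)|hx) <;>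
      simp only [pvClassifyA, h0, h1, h2, h3, h4, h5, h6, h7, h8, hx] <;>
      simp [pvLabelOf, pvLabels, pvDefault]
  by_cases h10 : pvCond 10 t = true
  · have hm : (pvM t).min? = some 10 := by
      apply pvMinM_eq_some t 10 (by omega) h10
      intro j hj
      interval_cases j
      · revert h0; simp [pvCond]
      · revert h1; simp [pvCond]
      · revert h2; simp [pvCond]
      · revert h3; simp [pvCond]
      · revert h4; simp [pvCond]
      · revert h5; simp [pvCond]
      · revert h6; simp [pvCond]
      · revert h7; simp [pvCond]
      · revert h8; simp [pvCond]
      · revert h9; simp [pvCond]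
    simp only [pvCond, Bool.or_eq_true, not_or, Bool.not_eq_true] at h0
    simp only [pvCond, Bool.or_eq_true, not_or, Bool.not_eq_true] at h1
    simp only [pvCond, Bool.or_eq_true, not_or, Bool.not_eq_true] at h2
    simp only [pvCond, Bool.or_eq_true, not_or, Bool.not_eq_true] at h3
    simp only [pvCond, Bool.or_eq_true, not_or, Bool.not_eq_true] at h4
    simp only [pvCond, Bool.or_eq_true, not_or, Bool.not_eq_true] at h5
    simp only [pvCond, Bool.or_eq_true, not_or, Bool.not_eq_true] at h6
    simp only [pvCond, Bool.or_eq_true, not_or, Bool.not_eq_true] at h7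
    simp only [pvCond, Bool.or_eq_true, not_or, Bool.not_eq_true] at h8
    simp only [pvCond, Bool.or_eq_true, not_or, Bool.not_eq_true] at h9
    simp only [pvCond, Bool.or_eq_true] at h10
    rw [hm]
    simp only [pvClassifyA, h0, h1, h2, h3, h4, h5, h6, h7, h8, h9, h10]
    simp [pvLabelOf, pvLabels, pvDefault]
  by_cases h11 : pvCond 11 t = true
  · have hm : (pvM t).min? = some 11 := by
      apply pvMinM_eq_some t 11 (by omega) h11
      intro j hj
      interval_cases j
      · revert h0; simp [pvCond]
      · revert h1; simp [pvCond]
      · revert h2; simp [pvCond]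
      · revert h3; simp [pvCond]
      · revert h4; simp [pvCond]
      · revert h5; simp [pvCond]
      · revert h6; simp [pvCond]
      · revert h7; simp [pvCond]
      · revert h8; simp [pvCond]
      · revert h9; simp [pvCond]
      · revert h10; simp [pvCond]
    simp only [pvCond, Bool.or_eq_true, not_or, Bool.not_eq_true] at h0
    simp only [pvCond, Bool.or_eq_true, not_or, Bool.not_eq_true] at h1
    simp only [pvCond, Bool.or_eq_true, not_or, Bool.not_eq_true] at h2
    simp only [pvCond, Bool.or_eq_true, not_or, Bool.not_eq_true] at h3
    simp only [pvCond, Bool.or_eq_true, not_or, Bool.not_eq_true] at h4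
    simp only [pvCond, Bool.or_eq_true, not_or, Bool.not_eq_true] at h5
    simp only [pvCond, Bool.or_eq_true, not_or, Bool.not_eq_true] at h6
    simp only [pvCond, Bool.or_eq_true, not_or, Bool.not_eq_true] at h7
    simp only [pvCond, Bool.or_eq_true, not_or, Bool.not_eq_true] at h8
    simp only [pvCond, Bool.or_eq_true, not_or, Bool.not_eq_true] at h9
    simp only [pvCond, Bool.or_eq_true, not_or, Bool.not_eq_true] at h10
    simp only [pvCond, Bool.or_eq_true] at h11
    rw [hm]
    rcases h11 with (hx|hx) <;>
      simp only [pvClassifyA, h0, h1, h2, h3, h4, h5, h6, h7, h8, h9, h10, hx] <;>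
      simp [pvLabelOf, pvLabels, pvDefault]
  by_cases h12 : pvCond 12 t = true
  · have hm : (pvM t).min? = some 12 := by
      apply pvMinM_eq_some t 12 (by omega) h12
      intro j hj
      interval_cases j
      · revert h0; simp [pvCond]
      · revert h1; simp [pvCond]
      · revert h2; simp [pvCond]
      · revert h3; simp [pvCond]
      · revert h4; simp [pvCond]
      · revert h5; simp [pvCond]
      · revert h6; simp [pvCond]
      · revert h7; simp [pvCond]
      · revert h8; simp [pvCond]
      · revert h9; simp [pvCond]
      · revert h10; simp [pvCond]
      · revert h11; simp [pvCond]
    simp only [pvCond, Bool.or_eq_true, not_or, Bool.not_eq_true] at h0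
    simp only [pvCond, Bool.or_eq_true, not_or, Bool.not_eq_true] at h1
    simp only [pvCond, Bool.or_eq_true, not_or, Bool.not_eq_true] at h2
    simp only [pvCond, Bool.or_eq_true, not_or, Bool.not_eq_true] at h3
    simp only [pvCond, Bool.or_eq_true, not_or, Bool.not_eq_true] at h4
    simp only [pvCond, Bool.or_eq_true, not_or, Bool.not_eq_true] at h5
    simp only [pvCond, Bool.or_eq_true, not_or, Bool.not_eq_true] at h6
    simp only [pvCond, Bool.or_eq_true, not_or, Bool.not_eq_true] at h7
    simp only [pvCond, Bool.or_eq_true, not_or, Bool.not_eq_true] at h8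
    simp only [pvCond, Bool.or_eq_true, not_or, Bool.not_eq_true] at h9
    simp only [pvCond, Bool.or_eq_true, not_or, Bool.not_eq_true] at h10
    simp only [pvCond, Bool.or_eq_true, not_or, Bool.not_eq_true] at h11
    simp only [pvCond, Bool.or_eq_true] at h12
    rw [hm]
    simp only [pvClassifyA, h0, h1, h2, h3, h4, h5, h6, h7, h8, h9, h10, h11, h12]
    simp [pvLabelOf, pvLabels, pvDefault]
  by_cases h13 : pvCond 13 t = true
  · have hm : (pvM t).min? = some 13 := by
      apply pvMinM_eq_some t 13 (by omega) h13
      intro j hj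
      interval_cases j
      · revert h0; simp [pvCond]
      · revert h1; simp [pvCond]
      · revert h2; simp [pvCond]
      · revert h3; simp [pvCond]
      · revert h4; simp [pvCond]
      · revert h5; simp [pvCond]
      · revert h6; simp [pvCond]
      · revert h7; simp [pvCond]
      · revert h8; simp [pvCond]
      · revert h9; simp [pvCond]
      · revert h10; simp [pvCond]
      · revert h11; simp [pvCond]
      · revert h12; simp [pvCond]
    simp only [pvCond, Bool.or_eq_true, not_or, Bool.not_eq_true] at h0
    simp only [pvCond, Bool.or_eq_true, not_or, Bool.not_eq_true] at h1
    simp only [pvCond, Bool.or_eq_true, not_or, Bool.not_eq_true] at h2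
    simp only [pvCond, Bool.or_eq_true, not_or, Bool.not_eq_true] at h3
    simp only [pvCond, Bool.or_eq_true, not_or, Bool.not_eq_true] at h4
    simp only [pvCond, Bool.or_eq_true, not_or, Bool.not_eq_true] at h5
    simp only [pvCond, Bool.or_eq_true, not_or, Bool.not_eq_true] at h6
    simp only [pvCond, Bool.or_eq_true, not_or, Bool.not_eq_true] at h7
    simp only [pvCond, Bool.or_eq_true, not_or, Bool.not_eq_true] at h8
    simp only [pvCond, Bool.or_eq_true, not_or, Bool.not_eq_true] at h9
    simp only [pvCond, Bool.or_eq_true, not_or, Bool.not_eq_true] at h10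
    simp only [pvCond, Bool.or_eq_true, not_or, Bool.not_eq_true] at h11
    simp only [pvCond, Bool.or_eq_true, not_or, Bool.not_eq_true] at h12
    simp only [pvCond, Bool.or_eq_true] at h13
    rw [hm]
    rcases h13 with ((hx|hx)|hx) <;>
      simp only [pvClassifyA, h0, h1, h2, h3, h4, h5, h6, h7, h8, h9, h10, h11, h12, hx] <;>
      simp [pvLabelOf, pvLabels, pvDefault]
  by_cases h14 : pvCond 14 t = true
  · have hm : (pvM t).min? = some 14 := by
      apply pvMinM_eq_some t 14 (by omega) h14
      intro j hj
      interval_cases j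
      · revert h0; simp [pvCond]
      · revert h1; simp [pvCond]
      · revert h2; simp [pvCond]
      · revert h3; simp [pvCond]
      · revert h4; simp [pvCond]
      · revert h5; simp [pvCond]
      · revert h6; simp [pvCond]
      · revert h7; simp [pvCond]
      · revert h8; simp [pvCond]
      · revert h9; simp [pvCond]
      · revert h10; simp [pvCond]
      · revert h11; simp [pvCond]
      · revert h12; simp [pvCond]
      · revert h13; simp [pvCond]
    simp only [pvCond, Bool.or_eq_true, not_or, Bool.not_eq_true] at h0
    simp only [pvCond, Bool.or_eq_true, not_or, Bool.not_eq_true] at h1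
    simp only [pvCond, Bool.or_eq_true, not_or, Bool.not_eq_true] at h2
    simp only [pvCond, Bool.or_eq_true, not_or, Bool.not_eq_true] at h3
    simp only [pvCond, Bool.or_eq_true, not_or, Bool.not_eq_true] at h4
    simp only [pvCond, Bool.or_eq_true, not_or, Bool.not_eq_true] at h5
    simp only [pvCond, Bool.or_eq_true, not_or, Bool.not_eq_true] at h6
    simp only [pvCond, Bool.or_eq_true, not_or, Bool.not_eq_true] at h7
    simp only [pvCond, Bool.or_eq_true, not_or, Bool.not_eq_true] at h8
    simp only [pvCond, Bool.or_eq_true, not_or, Bool.not_eq_true] at h9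
    simp only [pvCond, Bool.or_eq_true, not_or, Bool.not_eq_true] at h10
    simp only [pvCond, Bool.or_eq_true, not_or, Bool.not_eq_true] at h11
    simp only [pvCond, Bool.or_eq_true, not_or, Bool.not_eq_true] at h12
    simp only [pvCond, Bool.or_eq_true, not_or, Bool.not_eq_true] at h13
    simp only [pvCond, Bool.or_eq_true] at h14
    rw [hm]
    simp only [pvClassifyA, h0, h1, h2, h3, h4, h5, h6, h7, h8, h9, h10, h11, h12, h13, h14]
    simp [pvLabelOf, pvLabels, pvDefault]
  · -- no rule matches
    have hm : (pvM t).min? = none := by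
      apply pvMinM_eq_none
      intro j hj
      interval_cases j
      · revert h0; simp [pvCond]
      · revert h1; simp [pvCond]
      · revert h2; simp [pvCond]
      · revert h3; simp [pvCond]
      · revert h4; simp [pvCond]
      · revert h5; simp [pvCond]
      · revert h6; simp [pvCond]
      · revert h7; simp [pvCond]
      · revert h8; simp [pvCond]
      · revert h9; simp [pvCond]
      · revert h10; simp [pvCond]
      · revert h11; simp [pvCond]
      · revert h12; simp [pvCond]
      · revert h13; simp [pvCond]
      · revert h14; simp [pvCond]
    simp only [pvCond, Bool.or_eq_true, not_or, Bool.not_eq_true] at h0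
    simp only [pvCond, Bool.or_eq_true, not_or, Bool.not_eq_true] at h1
    simp only [pvCond, Bool.or_eq_true, not_or, Bool.not_eq_true] at h2
    simp only [pvCond, Bool.or_eq_true, not_or, Bool.not_eq_true] at h3
    simp only [pvCond, Bool.or_eq_true, not_or, Bool.not_eq_true] at h4
    simp only [pvCond, Bool.or_eq_true, not_or, Bool.not_eq_true] at h5
    simp only [pvCond, Bool.or_eq_true, not_or, Bool.not_eq_true] at h6
    simp only [pvCond, Bool.or_eq_true, not_or, Bool.not_eq_true] at h7
    simp only [pvCond, Bool.or_eq_true, not_or, Bool.not_eq_true] at h8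
    simp only [pvCond, Bool.or_eq_true, not_or, Bool.not_eq_true] at h9
    simp only [pvCond, Bool.or_eq_true, not_or, Bool.not_eq_true] at h10
    simp only [pvCond, Bool.or_eq_true, not_or, Bool.not_eq_true] at h11
    simp only [pvCond, Bool.or_eq_true, not_or, Bool.not_eq_true] at h12
    simp only [pvCond, Bool.or_eq_true, not_or, Bool.not_eq_true] at h13
    simp only [pvCond, Bool.or_eq_true, not_or, Bool.not_eq_true] at h14
    rw [hm]
    simp only [pvClassifyA, h0, h1, h2, h3, h4, h5, h6, h7, h8, h9, h10, h11, h12, h13, h14]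
    simp [pvLabelOf, pvDefault]

theorem pvBody_eq (tA tB : String) (h : tA = tB) :
    (if PySem.Str.strip tA = "" then "Financial Services" else pvClassifyA tA)
      = (if PySem.Str.strip tB = "" then pvDefault
         else pvLabelOf (pvMinHit tB)) := by
  subst h
  by_cases hs : PySem.Str.strip tA = ""
  · rw [if_pos hs, if_pos hs]
    rfl
  · rw [if_neg hs, if_neg hs]
    exact pvClassify_eq tA

-- ===== VERDICT (by name: the statement is the Claim_ definition above) =====
theorem derive_domain_py_spec : Claim_equal_derive_domain_py := by
  intro cn e w p _
  unfold Spec_derive_domain_py derive_domain_py derive_domain_py_alt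
  exact pvBody_eq _ _ (pvText_eq cn (e.getD []) (w.getD []) (p.getD []))
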